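-- pv_equiv track=rewrite | github.com/sungsteven/Python-DNP3-Scada-Master | DNP3_SC/dnp3_frame.py | getDataBlockLength
-- ===== SOURCE A (Python) =====
-- def getDataBlockLength(received_data):
--     lenVal = received_data[2]
--     dlnCount = 5    # octets not counted in Datalink header (05, 64, LEN, & CRC)
--     minCount = 0x05 # min LEN includes 1 Datalink header & partial data block
--     if lenVal > minCount:
--         dlCount = 5     # the # of countable bytes in Datalink header
--         lenTemp = lenVal - dlCount
--         loopCount = 0
--         dbCount = 16    # the max # of countable bytes in a Data Block
--         while True:
--             lenTemp -= dbCount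
--             loopCount += 1
--             if lenTemp < dbCount:
--                 break
--         if lenTemp > 0:
--             loopCount += 1
--         dbnCount = 2    # octets not counted in Data Block (CRC's 2 for each DB)
--         return (loopCount, lenVal+dlnCount+loopCount*dbnCount)
--     elif lenVal == minCount:
--         return (0, lenVal+dlnCount)
--     else:
--         return (-1, -1)
-- ===== SOURCE B (Python) =====
-- def getDataBlockLength(received_data):
--     lenVal = received_data[2]
--     if lenVal < 5:
--         return (-1, -1)
--     if lenVal == 5:
--         return (0, lenVal + 5)
--     loopCount = (lenVal + 10) // 16
--     return (loopCount, lenVal + 5 + loopCount * 2)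
-- ===== Notes on version B (the rewrite author's own statement) =====
-- stated objective: simpler
-- what changed: Replaces A's subtract-16 do-while loop plus remainder bump with the closed-form block count (lenVal+10)//16, keeping the three-way branch on lenVal.
import Mathlib
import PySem

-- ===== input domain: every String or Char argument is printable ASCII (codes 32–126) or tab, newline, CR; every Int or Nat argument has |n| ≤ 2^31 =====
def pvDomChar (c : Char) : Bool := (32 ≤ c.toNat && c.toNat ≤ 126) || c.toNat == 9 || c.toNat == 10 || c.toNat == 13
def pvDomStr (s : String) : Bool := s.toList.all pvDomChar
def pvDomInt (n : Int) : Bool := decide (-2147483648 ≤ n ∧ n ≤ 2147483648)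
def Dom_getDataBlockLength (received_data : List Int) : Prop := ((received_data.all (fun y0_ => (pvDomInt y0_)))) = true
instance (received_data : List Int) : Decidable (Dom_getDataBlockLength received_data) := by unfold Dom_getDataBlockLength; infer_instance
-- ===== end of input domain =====

-- B replaces A's subtract-16 do-while loop with the closed form (lenVal+10)//16 (simpler, no loop).

-- ===== PORT A =====
-- A's 'while True: lenTemp -= 16; loopCount += 1; if lenTemp < 16: break' loop.
def pvLoopA (lenTemp loopCount : Int) : Int × Int :=
  let lenTemp' := lenTemp - 16
  let loopCount' := loopCount + 1
  if lenTemp' < 16 then (lenTemp', loopCount')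
  else pvLoopA lenTemp' loopCount'
termination_by lenTemp.toNat
decreasing_by omega

def getDataBlockLength (received_data : List Int) : Int × Int :=
  match PySem.List.pyGet? received_data 2 with
  | none => (-1, -1)   -- IndexError in Python; excluded by Pre_
  | some lenVal =>
    if lenVal > 5 then
      let p := pvLoopA (lenVal - 5) 0
      let loopCount := if p.1 > 0 then p.2 + 1 else p.2
      (loopCount, lenVal + 5 + loopCount * 2)
    else if lenVal = 5 then
      (0, lenVal + 5)
    else
      (-1, -1)

-- ===== PORT B =====
def getDataBlockLength_alt (received_data : List Int) : Int × Int :=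
  match PySem.List.pyGet? received_data 2 with
  | none => (-1, -1)   -- IndexError in Python; excluded by Pre_
  | some lenVal =>
    if lenVal < 5 then (-1, -1)
    else if lenVal = 5 then (0, lenVal + 5)
    else
      let loopCount := PySem.Int.floordiv (lenVal + 10) 16
      (loopCount, lenVal + 5 + loopCount * 2)

-- ===== PRECONDITION & SPEC =====
-- Pre_ excludes only lists shorter than 3, where Python's received_data[2] raises IndexError (in both A and B).
def Pre_getDataBlockLength (received_data : List Int) : Prop := 3 ≤ received_data.length
instance (received_data : List Int) : Decidable (Pre_getDataBlockLength received_data) := by unfold Pre_getDataBlockLength; infer_instance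
def pvWitness_getDataBlockLength : List Int := [5, 100, 40]

def Spec_getDataBlockLength (received_data : List Int) (out : Int × Int) : Prop := out = getDataBlockLength_alt received_data
instance (received_data : List Int) (out : Int × Int) : Decidable (Spec_getDataBlockLength received_data out) := by unfold Spec_getDataBlockLength; infer_instance

-- ===== CLAIM (what is proved, stated in full; the proofs are below) =====
def Claim_equal_getDataBlockLength : Prop := ∀ (received_data : List Int), Dom_getDataBlockLength received_data → Pre_getDataBlockLength received_data → Spec_getDataBlockLength received_data (getDataBlockLength received_data)

-- ===== LEMMAS AND PROOFS =====

-- A's loop, followed by the '+1 if lenTemp > 0' bump, counts ⌈L/16⌉ = (L+15)/16 blocks for L ≥ 1.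
theorem pvLoopA_count (L c : Int) (h : 1 ≤ L) :
    (if (pvLoopA L c).1 > 0 then (pvLoopA L c).2 + 1 else (pvLoopA L c).2) = c + (L + 15) / 16 := by
  rw [pvLoopA]
  by_cases h16 : L - 16 < 16
  · simp only [h16, if_true]
    split_ifs <;> omega
  · simp only [h16, if_false]
    have ih := pvLoopA_count (L - 16) (c + 1) (by omega)
    rw [ih]
    omega
termination_by L.toNat
decreasing_by omega

-- ===== VERDICT (by name: the statement is the Claim_ definition above) =====
theorem getDataBlockLength_spec : Claim_equal_getDataBlockLength := by
  intro rd _ hpre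
  unfold Spec_getDataBlockLength getDataBlockLength getDataBlockLength_alt
  match rd, hpre with
  | a :: b :: c :: t, _ =>
    rw [show PySem.List.pyGet? (a :: b :: c :: t) 2 = some c by
      simp [PySem.List.pyGet?, PySem.List.pyIdx?]
      rw [if_pos (by omega)]; rfl]
    by_cases h5 : c > 5
    · have hne : ¬ c = 5 := by omega
      have hlt : ¬ c < 5 := by omega
      simp only [h5, hne, hlt, if_true, if_false]
      have hc := pvLoopA_count (c - 5) 0 (by omega)
      have hfd : PySem.Int.floordiv (c + 10) 16 = (c + 10) / 16 :=
        PySem.Int.floordiv_eq_ediv_of_pos (by norm_num)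
      rw [hc, hfd, show c - 5 + 15 = c + 10 by ring]
      norm_num
    · by_cases he : c = 5
      · simp [he]
      · have hlt : c < 5 := by omega
        simp only [h5, he, hlt, if_true, if_false]
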